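-- pv_equiv track=rewrite | github.com/xuxin2023/gas_calibrator | src/gas_calibrator/v2/core/multi_source_stability.py | _coverage_status_from_groups
-- ===== SOURCE A (Python) =====
-- from typing import Any, Iterable
--
-- SIGNAL_GROUP_ORDER = ("reference", "analyzer_raw", "output", "data_quality")
--
-- def _coverage_status_from_groups(signal_group_coverage: dict[str, dict[str, Any]]) -> str:
--     statuses = [
--         str(dict(signal_group_coverage.get(group_name) or {}).get("coverage_status") or "missing")
--         for group_name in SIGNAL_GROUP_ORDER
--     ]
--     if statuses and all(status == "complete" for status in statuses):
--         return "complete"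
--     if any(status == "partial" for status in statuses):
--         return "partial"
--     if any(status == "complete" for status in statuses):
--         return "partial"
--     return "missing"
-- ===== SOURCE B (Python) =====
-- SIGNAL_GROUP_ORDER = ("reference", "analyzer_raw", "output", "data_quality")
--
-- def _coverage_status_from_groups(signal_group_coverage):
--     # Lattice view: each group's status is normalized to one of
--     # {"complete", "partial", "missing"}, and the overall status is the
--     # reduction of those values under the commutative join
--     #   join(x, y) = x if x == y else "partial"
--     # (complete+complete=complete, missing+missing=missing, any mix=partial),
--     # which matches the intended semantics: complete iff all complete,
--     # missing iff no signal at all, partial otherwise.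
--     def norm(group_name):
--         status = str(dict(signal_group_coverage.get(group_name) or {}).get("coverage_status") or "missing")
--         return status if status in ("complete", "partial") else "missing"
--
--     def join(x, y):
--         return x if x == y else "partial"
--
--     def reduce_groups(groups):
--         if len(groups) == 1:
--             return norm(groups[0])
--         return join(norm(groups[0]), reduce_groups(groups[1:]))
--
--     return reduce_groups(SIGNAL_GROUP_ORDER)
-- ===== Notes on version B (the rewrite author's own statement) =====
-- stated objective: alternative
-- what changed: Replaces the status-list comprehension plus three all/any scans with a recursive lattice reduction: each group's status is normalized to {complete, partial, missing} and the results are folded with the commutative join x if x==y else 'partial'.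
import Mathlib
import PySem

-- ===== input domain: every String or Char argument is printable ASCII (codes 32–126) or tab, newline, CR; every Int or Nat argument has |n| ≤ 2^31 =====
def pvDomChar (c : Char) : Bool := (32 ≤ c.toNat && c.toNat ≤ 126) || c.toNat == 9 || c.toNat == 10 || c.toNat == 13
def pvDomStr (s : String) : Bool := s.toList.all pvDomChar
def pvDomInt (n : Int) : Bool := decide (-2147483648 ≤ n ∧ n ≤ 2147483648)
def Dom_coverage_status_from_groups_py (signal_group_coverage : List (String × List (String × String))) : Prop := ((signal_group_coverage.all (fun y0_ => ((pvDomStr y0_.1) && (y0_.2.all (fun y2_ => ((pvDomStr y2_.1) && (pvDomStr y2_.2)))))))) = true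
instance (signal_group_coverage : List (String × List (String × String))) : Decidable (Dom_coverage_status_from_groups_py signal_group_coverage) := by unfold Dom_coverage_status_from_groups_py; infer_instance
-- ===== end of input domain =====

-- B replaces the status list plus three all/any scans by a recursive reduction of
-- normalized per-group statuses under the lattice join x⊔y = (x if x=y else "partial").
-- ===== PORT A =====
-- str(dict(signal_group_coverage.get(group_name) or {}).get("coverage_status") or "missing")
def pvStatus (signal_group_coverage : List (String × List (String × String))) (group_name : String) : String :=
  let entry : PySem.Dict String String :=
    match (PySem.Dict.mk signal_group_coverage).get? group_name with
    | some v => if v = [] then PySem.Dict.mk [] else PySem.Dict.mk v  -- `or {}` on a falsy (empty) dict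
    | none => PySem.Dict.mk []
  match entry.get? "coverage_status" with
  | some s => if s = "" then "missing" else s  -- `or "missing"` on a falsy (empty) string
  | none => "missing"

def coverage_status_from_groups_py (signal_group_coverage : List (String × List (String × String))) : String :=
  let statuses := ["reference", "analyzer_raw", "output", "data_quality"].map (pvStatus signal_group_coverage)
  if statuses ≠ [] ∧ statuses.all (fun status => status = "complete") then "complete"
  else if statuses.any (fun status => status = "partial") then "partial"
  else if statuses.any (fun status => status = "complete") then "partial"
  else "missing"

-- ===== PORT B =====
-- Source B's `norm`: the same Python status expression, then normalized into {complete, partial, missing}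
def pvNormB (signal_group_coverage : List (String × List (String × String))) (group_name : String) : String :=
  let entry : PySem.Dict String String :=
    match (PySem.Dict.mk signal_group_coverage).get? group_name with
    | some v => if v = [] then PySem.Dict.mk [] else PySem.Dict.mk v
    | none => PySem.Dict.mk []
  let status : String :=
    match entry.get? "coverage_status" with
    | some s => if s = "" then "missing" else s
    | none => "missing"
  if status = "complete" ∨ status = "partial" then status else "missing"

-- Source B's `join`
def pvJoin (x y : String) : String := if x = y then x else "partial"

-- Source B's `reduce_groups` (recursion on the group tuple; [] is unreachable in Source B)
def pvReduceGroups (signal_group_coverage : List (String × List (String × String))) : List String → String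
  | [g] => pvNormB signal_group_coverage g
  | g :: rest@(_ :: _) => pvJoin (pvNormB signal_group_coverage g) (pvReduceGroups signal_group_coverage rest)
  | [] => "missing"

def coverage_status_from_groups_py_alt (signal_group_coverage : List (String × List (String × String))) : String :=
  pvReduceGroups signal_group_coverage ["reference", "analyzer_raw", "output", "data_quality"]

-- ===== PRECONDITION & SPEC =====
def Spec_coverage_status_from_groups_py (signal_group_coverage : List (String × List (String × String))) (out : String) : Prop := out = coverage_status_from_groups_py_alt signal_group_coverage
instance (signal_group_coverage : List (String × List (String × String))) (out : String) : Decidable (Spec_coverage_status_from_groups_py signal_group_coverage out) := by unfold Spec_coverage_status_from_groups_py; infer_instance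

-- ===== CLAIM (what is proved, stated in full; the proofs are below) =====
def Claim_equal_coverage_status_from_groups_py : Prop := ∀ (signal_group_coverage : List (String × List (String × String))), Dom_coverage_status_from_groups_py signal_group_coverage → Spec_coverage_status_from_groups_py signal_group_coverage (coverage_status_from_groups_py signal_group_coverage)

-- ===== LEMMAS AND PROOFS =====
-- B's norm is A's status expression followed by normalization
theorem pvNormB_eq (sgc : List (String × List (String × String))) (g : String) :
    pvNormB sgc g = (if pvStatus sgc g = "complete" ∨ pvStatus sgc g = "partial" then pvStatus sgc g else "missing") := rfl

def pvNormStr (s : String) : String := if s = "complete" ∨ s = "partial" then s else "missing"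

-- core fact: for any four status strings, A's list-plus-scans decision equals
-- the lattice-join reduction of their normalizations
theorem pvKey (s1 s2 s3 s4 : String) :
    (let statuses := [s1, s2, s3, s4]
     if statuses ≠ [] ∧ statuses.all (fun status => status = "complete") then "complete"
     else if statuses.any (fun status => status = "partial") then "partial"
     else if statuses.any (fun status => status = "complete") then "partial"
     else "missing")
    =
    pvJoin (pvNormStr s1) (pvJoin (pvNormStr s2) (pvJoin (pvNormStr s3) (pvNormStr s4))) := by
  simp only [List.all, List.any, pvJoin, pvNormStr, ne_eq]
  by_cases h1 : s1 = "complete" <;> by_cases h2 : s2 = "complete" <;>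
  by_cases h3 : s3 = "complete" <;> by_cases h4 : s4 = "complete" <;>
  by_cases p1 : s1 = "partial" <;> by_cases p2 : s2 = "partial" <;>
  by_cases p3 : s3 = "partial" <;> by_cases p4 : s4 = "partial" <;>
  simp_all

-- ===== VERDICT (by name: the statement is the Claim_ definition above) =====
theorem coverage_status_from_groups_py_spec : Claim_equal_coverage_status_from_groups_py := by
  intro sgc _
  unfold Spec_coverage_status_from_groups_py coverage_status_from_groups_py coverage_status_from_groups_py_alt
  simp only [List.map, pvReduceGroups, pvNormB_eq]
  exact pvKey _ _ _ _
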